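-- pv_equiv track=rewrite | github.com/jhontantan/AGATE-L3 | main.py | get_name_mail
-- ===== SOURCE A (Python) =====
-- def get_name_mail(name):
--     res = None
--     for ind_l in reversed(range(len(name) - 1)):
--         if name[ind_l] == '\\':
--             res = name[ind_l + 1:len(name)]
--             break
--
--     if not res:
--         for ind_l in reversed(range(len(name) - 1)):
--             if name[ind_l] == '/':
--                 return name[ind_l + 1:len(name)]
--     return res
-- ===== SOURCE B (Python) =====
-- def get_name_mail(name):
--     last_bs = None
--     last_slash = None
--     for i in range(len(name) - 1):
--         c = name[i]
--         if c == '\\':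
--             last_bs = i
--         elif c == '/':
--             last_slash = i
--     if last_bs is not None:
--         return name[last_bs + 1:len(name)]
--     if last_slash is not None:
--         return name[last_slash + 1:len(name)]
--     return None
-- ===== Notes on version B (the rewrite author's own statement) =====
-- stated objective: simpler
-- what changed: Replaced A's two reverse scans with break and a truthiness re-test by one forward pass that records the last backslash and slash positions, then slices once.
import Mathlib
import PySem

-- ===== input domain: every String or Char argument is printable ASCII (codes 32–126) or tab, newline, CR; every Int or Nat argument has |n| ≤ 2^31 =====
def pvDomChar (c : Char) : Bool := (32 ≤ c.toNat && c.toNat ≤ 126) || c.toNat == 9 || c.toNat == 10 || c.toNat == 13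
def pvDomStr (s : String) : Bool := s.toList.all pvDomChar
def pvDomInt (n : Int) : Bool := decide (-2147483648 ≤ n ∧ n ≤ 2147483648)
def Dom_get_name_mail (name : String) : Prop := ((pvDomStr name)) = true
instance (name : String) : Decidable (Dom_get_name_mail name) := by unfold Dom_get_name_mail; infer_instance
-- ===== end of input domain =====

-- B replaces A's two reverse scans (with break and a truthiness re-test) by one forward
-- pass recording the last backslash/slash positions: simpler, same O(n) cost.


-- ===== PORT A =====
-- one reverse scan of A: first index i in idxs with name[i] = c, break with name[i+1:]
def pvLoopA (cs : List Char) (c : Char) : List Nat → Option (List Char)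
  | [] => none
  | i :: rest => if cs[i]? = some c then some (cs.drop (i + 1)) else pvLoopA cs c rest

def get_name_mail (name : String) : Option String :=
  let cs := name.toList
  let idxs := (List.range (cs.length - 1)).reverse   -- reversed(range(len(name) - 1))
  let res := pvLoopA cs '\\' idxs
  (if res = none ∨ res = some [] then                -- 'if not res'
    match pvLoopA cs '/' idxs with
    | some r => some r
    | none => res
  else res).map (fun r => String.ofList r)

-- ===== PORT B =====
-- one forward pass keeping the last seen backslash / slash index
def pvLoopB (cs : List Char) : List Nat → Option Nat → Option Nat → Option Nat × Option Nat
  | [], bs, sl => (bs, sl)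
  | i :: rest, bs, sl =>
      if cs[i]? = some '\\' then pvLoopB cs rest (some i) sl
      else if cs[i]? = some '/' then pvLoopB cs rest bs (some i)
      else pvLoopB cs rest bs sl

def get_name_mail_alt (name : String) : Option String :=
  let cs := name.toList
  let p := pvLoopB cs (List.range (cs.length - 1)) none none
  match p.1 with
  | some i => some (String.ofList (cs.drop (i + 1)))
  | none =>
    match p.2 with
    | some i => some (String.ofList (cs.drop (i + 1)))
    | none => none

-- ===== PRECONDITION & SPEC =====
def Spec_get_name_mail (name : String) (out : Option String) : Prop := out = get_name_mail_alt name
instance (name : String) (out : Option String) : Decidable (Spec_get_name_mail name out) := by unfold Spec_get_name_mail; infer_instance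

-- ===== CLAIM (what is proved, stated in full; the proofs are below) =====
def Claim_equal_get_name_mail : Prop := ∀ (name : String), Dom_get_name_mail name → Spec_get_name_mail name (get_name_mail name)

-- ===== LEMMAS AND PROOFS =====

-- A's scan is find?-then-slice over its index list
theorem pvLoopA_eq_find (cs : List Char) (c : Char) (idxs : List Nat) :
    pvLoopA cs c idxs
      = (idxs.find? (fun i => cs[i]? = some c)).map (fun i => cs.drop (i + 1)) := by
  induction idxs with
  | nil => rfl
  | cons i rest ih =>
      by_cases h : cs[i]? = some c <;> simp [pvLoopA, List.find?, h, ih]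

-- B's first tracker is the last backslash of the forward list = first of the reversed list
theorem pvLoopB_fst (cs : List Char) (idxs : List Nat) (bs sl : Option Nat) :
    (pvLoopB cs idxs bs sl).1
      = ((idxs.reverse.find? (fun i => cs[i]? = some '\\')).or bs) := by
  induction idxs generalizing bs sl with
  | nil => rfl
  | cons i rest ih =>
      by_cases h1 : cs[i]? = some '\\'
      · simp [pvLoopB, h1, ih, List.find?_append, List.find?]
      · by_cases h2 : cs[i]? = some '/' <;>
          simp [pvLoopB, h1, h2, ih, List.find?_append, List.find?]

-- B's second tracker is the last slash (never updated where a backslash sits, but no char is both)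
theorem pvLoopB_snd (cs : List Char) (idxs : List Nat) (bs sl : Option Nat) :
    (pvLoopB cs idxs bs sl).2
      = ((idxs.reverse.find? (fun i => cs[i]? = some '/')).or sl) := by
  induction idxs generalizing bs sl with
  | nil => rfl
  | cons i rest ih =>
      by_cases h1 : cs[i]? = some '\\'
      · simp [pvLoopB, h1, ih, List.find?_append, List.find?]
      · by_cases h2 : cs[i]? = some '/'
        · simp [pvLoopB, h2, ih, List.find?_append, List.find?]
        · simp [pvLoopB, h1, h2, ih, List.find?_append, List.find?]

-- a found index lies below length - 1, so the sliced suffix is nonempty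
theorem pv_found_drop_ne_nil (cs : List Char) (c : Char) {i : Nat}
    (h : (List.range (cs.length - 1)).reverse.find? (fun j => cs[j]? = some c) = some i) :
    cs.drop (i + 1) ≠ [] := by
  have hmem := List.mem_of_find?_eq_some h
  have hi : i < cs.length - 1 := by
    have := List.mem_reverse.mp hmem
    simpa using List.mem_range.mp this
  have : i + 1 < cs.length := by omega
  simp [List.drop_eq_nil_iff]
  omega

-- ===== VERDICT (by name: the statement is the Claim_ definition above) =====
theorem get_name_mail_spec : Claim_equal_get_name_mail := by
  intro name _
  unfold Spec_get_name_mail get_name_mail get_name_mail_alt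
  simp only [pvLoopA_eq_find, pvLoopB_fst, pvLoopB_snd, Option.or_none]
  set cs := name.toList with hcs
  cases hbs : (List.range (cs.length - 1)).reverse.find? (fun j => cs[j]? = some '\\') with
  | some i =>
      have hne := pv_found_drop_ne_nil cs '\\' hbs
      simp [hne]
  | none =>
      cases hsl : (List.range (cs.length - 1)).reverse.find? (fun j => cs[j]? = some '/') with
      | some i => simp
      | none => simp
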